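-- pv_equiv track=rewrite | github.com/mohameden19961/tp-NCO | Td4/Exercice7.py | lz78_decompression
-- ===== SOURCE A (Python) =====
-- def lz78_decompression(code):
--     dictionnaire = {0: ""}
--     index = 1
--     texte = ""
--
--     for indice, caractere in code:
--         chaine = dictionnaire[indice] + caractere
--         texte += chaine
--         dictionnaire[index] = chaine
--         index += 1
--
--     return texte
-- ===== SOURCE B (Python) =====
-- def lz78_decompression(code):
--     # Dictionary kept as parent-pointer entries (parent_index, char); each emitted
--     # string is rebuilt by walking the chain back to root and reversing the pieces.
--     entries = [(0, "")]
--     out = []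
--     for indice, caractere in code:
--         entries.append((indice, caractere))
--         piece = []
--         j = len(entries) - 1
--         while j != 0:
--             p, c = entries[j]
--             piece.append(c)
--             j = p
--         out.append("".join(reversed(piece)))
--     return "".join(out)
-- ===== Notes on version B (the rewrite author's own statement) =====
-- stated objective: alternative
-- what changed: B stores the LZ78 dictionary as parent-pointer entries (parent_index, char) instead of full strings and reconstructs each emitted phrase by walking the chain back to the root, collecting pieces and reversing them; output is joined once at the end instead of repeated string concatenation.
import Mathlib
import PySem

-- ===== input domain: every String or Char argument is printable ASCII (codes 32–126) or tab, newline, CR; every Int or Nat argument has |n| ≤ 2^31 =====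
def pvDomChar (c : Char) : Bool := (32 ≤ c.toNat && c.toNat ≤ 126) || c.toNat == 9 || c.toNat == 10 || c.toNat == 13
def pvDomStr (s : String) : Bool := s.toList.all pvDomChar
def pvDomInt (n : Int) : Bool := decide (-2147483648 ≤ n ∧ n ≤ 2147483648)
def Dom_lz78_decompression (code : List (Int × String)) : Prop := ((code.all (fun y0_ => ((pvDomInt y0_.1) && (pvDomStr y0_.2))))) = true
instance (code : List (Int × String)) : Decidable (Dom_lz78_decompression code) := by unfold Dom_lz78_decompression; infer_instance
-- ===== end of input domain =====

-- B rebuilds each emitted phrase by walking parent pointers instead of storing full strings; same return value on Pre_.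

-- ===== PORT A =====
-- A's loop over (indice, caractere): dict of full strings (as List Char), running text.
-- dictionnaire[indice] raises KeyError when the key is absent; Pre_ excludes exactly those
-- inputs, so getD with default [] is exact on the admitted domain.
def lzAGo : List (Int × String) → PySem.Dict Int (List Char) → Int → List Char → List Char
  | [], _, _, texte => texte
  | (indice, caractere) :: rest, d, index, texte =>
    let chaine := PySem.Dict.getD d indice [] ++ caractere.toList
    lzAGo rest (d.insert index chaine) (index + 1) (texte ++ chaine)

def lz78_decompression (code : List (Int × String)) : String :=
  String.ofList (lzAGo code (PySem.Dict.ofList [((0 : Int), ([] : List Char))]) 1 [])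

-- ===== PORT B =====
-- while j != 0: p, c = entries[j]; piece.append(c); j = p   — fuel = len(entries) only makes
-- the loop total; inside Pre_ every parent index is strictly smaller, so the fuel never runs out.
def walkB (e : List (Int × List Char)) : Nat → Int → List (List Char) → List (List Char)
  | 0, _, acc => acc
  | fuel + 1, j, acc =>
    if j = 0 then acc
    else
      match PySem.List.pyGet? e j with
      | some pc => walkB e fuel pc.1 (acc ++ [pc.2])
      | none => acc

def lzBGo : List (Int × String) → List (Int × List Char) → List (List Char) → List (List Char)
  | [], _, out => out
  | (indice, caractere) :: rest, entries, out =>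
    let entries' := entries ++ [(indice, caractere.toList)]
    let piece := (walkB entries' entries'.length ((entries'.length : Int) - 1) []).reverse.flatten
    lzBGo rest entries' (out ++ [piece])

def lz78_decompression_alt (code : List (Int × String)) : String :=
  String.ofList (lzBGo code [((0 : Int), ([] : List Char))] []).flatten

-- ===== PRECONDITION & SPEC =====
-- Pre_ excludes exactly the inputs where A raises KeyError: pair k must refer to an
-- already-assigned dictionary index, i.e. 0 ≤ code[k].1 ≤ k.
def Pre_lz78_decompression (code : List (Int × String)) : Prop :=
  ∀ k, (h : k < code.length) → 0 ≤ (code[k]'h).1 ∧ (code[k]'h).1 ≤ (k : Int)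
instance (code : List (Int × String)) : Decidable (Pre_lz78_decompression code) := by
  unfold Pre_lz78_decompression; infer_instance

def pvWitness_lz78_decompression : (List (Int × String)) := [(0, "a"), (1, "b"), (2, "c")]

def Spec_lz78_decompression (code : List (Int × String)) (out : String) : Prop := out = lz78_decompression_alt code
instance (code : List (Int × String)) (out : String) : Decidable (Spec_lz78_decompression code out) := by unfold Spec_lz78_decompression; infer_instance

-- ===== CLAIM (what is proved, stated in full; the proofs are below) =====
def Claim_equal_lz78_decompression : Prop := ∀ (code : List (Int × String)), Dom_lz78_decompression code → Pre_lz78_decompression code → Spec_lz78_decompression code (lz78_decompression code)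

-- ===== LEMMAS AND PROOFS =====

-- accumulator law for the back-walk
theorem walkB_acc (e : List (Int × List Char)) :
    ∀ (fuel : Nat) (j : Int) (acc : List (List Char)),
    walkB e fuel j acc = acc ++ walkB e fuel j [] := by
  intro fuel
  induction fuel with
  | zero => intro j acc; simp [walkB]
  | succ f ih =>
    intro j acc
    by_cases hj : j = 0
    · simp [walkB, hj]
    · cases hg : PySem.List.pyGet? e j with
      | none => simp [walkB, hj, hg]
      | some pc =>
        simp only [walkB, if_neg hj, hg]
        rw [ih pc.1 (acc ++ [pc.2]), ih pc.1 ([] ++ [pc.2])]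
        simp

-- loop invariant: entry j of B's parent-pointer table walks back to exactly A's dict string
def LzInv (e : List (Int × List Char)) (d : PySem.Dict Int (List Char)) : Prop :=
  ∀ j : Nat, j < e.length → ∃ v w,
    PySem.Dict.get? d (j : Int) = some v ∧
    w.reverse.flatten = v ∧
    ∀ (ext : List (Int × List Char)) (fuel : Nat), j + 1 ≤ fuel →
      walkB (e ++ ext) fuel (j : Int) [] = w

theorem main_inv :
    ∀ (rest : List (Int × String)) (e : List (Int × List Char))
      (d : PySem.Dict Int (List Char)) (out : List (List Char)),
    (∀ k, (h : k < rest.length) → 0 ≤ (rest[k]'h).1 ∧ (rest[k]'h).1 < (e.length : Int) + k) →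
    0 < e.length →
    LzInv e d →
    lzAGo rest d (e.length : Int) out.flatten = (lzBGo rest e out).flatten := by
  intro rest
  induction rest with
  | nil => intro e d out _ _ _; simp [lzAGo, lzBGo]
  | cons hd tl ih =>
    intro e d out hpre hlen hinv
    obtain ⟨indice, caractere⟩ := hd
    have h0 := hpre 0 (by simp)
    simp only [List.getElem_cons_zero, Nat.cast_zero, add_zero] at h0
    -- A's dict lookup
    have hitoNat : indice.toNat < e.length := by omega
    obtain ⟨v, w, hget, hwv, hwalk⟩ := hinv indice.toNat hitoNat
    have hicast : ((indice.toNat : Nat) : Int) = indice := by omega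
    rw [hicast] at hget hwalk
    have hgetD : PySem.Dict.getD d indice [] = v := by
      rw [PySem.Dict.getD_eq_get?_getD, hget]; rfl
    -- B's emitted piece
    set e' : List (Int × List Char) := e ++ [(indice, caractere.toList)] with he'
    have hlen' : e'.length = e.length + 1 := by simp [he']
    have hwalkNew : ∀ (ext : List (Int × List Char)) (fuel : Nat), e.length + 1 ≤ fuel →
        walkB (e' ++ ext) fuel ((e.length : Nat) : Int) [] = caractere.toList :: w := by
      intro ext fuel hfuel
      obtain ⟨f, rfl⟩ : ∃ f, fuel = f + 1 := ⟨fuel - 1, by omega⟩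
      have hjne : ((e.length : Nat) : Int) ≠ 0 := by
        have : 0 < e.length := hlen; omega
      have hgetE : PySem.List.pyGet? (e' ++ ext) ((e.length : Nat) : Int)
          = some (indice, caractere.toList) := by
        have : e' ++ ext = e ++ ((indice, caractere.toList) :: ext) := by simp [he']
        rw [this]
        exact PySem.List.pyGet?_append_length _ _ _
      simp only [walkB, if_neg hjne, hgetE]
      rw [walkB_acc]
      have : walkB (e' ++ ext) f indice [] = w := by
        have : e' ++ ext = e ++ ((indice, caractere.toList) :: ext) := by simp [he']
        rw [this]
        exact hwalk _ f (by omega)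
      rw [this]
      simp
    have hwalkTop : walkB e' e'.length ((e'.length : Int) - 1) [] = caractere.toList :: w := by
      have hcast : ((e'.length : Int) - 1) = ((e.length : Nat) : Int) := by
        rw [hlen']; push_cast; ring
      rw [hcast]
      have := hwalkNew [] e'.length (by omega)
      simpa using this
    have hpiece : (walkB e' e'.length ((e'.length : Int) - 1) []).reverse.flatten
        = v ++ caractere.toList := by
      rw [hwalkTop]; simp [hwv]
    -- unfold one step of both loops
    show lzAGo ((indice, caractere) :: tl) d (e.length : Int) out.flatten
        = (lzBGo ((indice, caractere) :: tl) e out).flatten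
    simp only [lzAGo, lzBGo, hgetD]
    rw [hpiece]
    have hout : out.flatten ++ (v ++ caractere.toList)
        = (out ++ [v ++ caractere.toList]).flatten := by simp
    rw [hout]
    have hcastlen : (e.length : Int) + 1 = (e'.length : Int) := by rw [hlen']; push_cast; ring
    rw [hcastlen]
    apply ih e' (d.insert (e.length : Int) (v ++ caractere.toList)) (out ++ [v ++ caractere.toList])
    · intro k hk
      have := hpre (k + 1) (by simpa using Nat.succ_lt_succ hk)
      simp only [List.getElem_cons_succ] at this
      rw [hlen']
      push_cast
      push_cast at this
      omega
    · omega
    · -- invariant preserved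
      intro j hj
      rw [hlen'] at hj
      by_cases hje : j = e.length
      · refine ⟨v ++ caractere.toList, caractere.toList :: w, ?_, by simp [hwv], ?_⟩
        · subst hje; exact PySem.Dict.get?_insert_self _ _ _
        · intro ext fuel hfuel
          subst hje
          exact hwalkNew ext fuel (by omega)
      · have hjlt : j < e.length := by omega
        obtain ⟨v', w', hget', hwv', hwalk'⟩ := hinv j hjlt
        refine ⟨v', w', ?_, hwv', ?_⟩
        · rw [PySem.Dict.get?_insert_of_ne _ _ (by omega : ((j : Nat) : Int) ≠ (e.length : Int))]
          exact hget'
        · intro ext fuel hfuel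
          have : e' ++ ext = e ++ ((indice, caractere.toList) :: ext) := by simp [he']
          rw [this]
          exact hwalk' _ fuel hfuel

-- ===== VERDICT (by name: the statement is the Claim_ definition above) =====
theorem lz78_decompression_spec : Claim_equal_lz78_decompression := by
  intro code _ hpre
  show String.ofList _ = String.ofList _
  congr 1
  have : lzAGo code (PySem.Dict.ofList [((0 : Int), ([] : List Char))]) 1
      ([] : List (List Char)).flatten
      = (lzBGo code [((0 : Int), ([] : List Char))] []).flatten := by
    have := main_inv code [((0 : Int), ([] : List Char))]
      (PySem.Dict.ofList [((0 : Int), ([] : List Char))]) []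
      (by
        intro k hk
        have := hpre k hk
        simp only [List.length_singleton, Nat.cast_one]
        omega)
      (by simp)
      (by
        intro j hj
        simp only [List.length_singleton] at hj
        interval_cases j
        refine ⟨[], [], by decide, rfl, ?_⟩
        intro ext fuel hfuel
        obtain ⟨f, rfl⟩ : ∃ f, fuel = f + 1 := ⟨fuel - 1, by omega⟩
        simp [walkB])
    simpa using this
  simpa using this
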